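-- pv_equiv track=rewrite | github.com/huy-tran-22/PTIT_PYTHON | PY01055.py | solve
-- ===== SOURCE A (Python) =====
-- def solve (s):
--     if (len(s) % 2 == 0):
--         return False
--     if s[0] == s[1]:
--         return False
--     for i in range(0,len(s)-2,2):
--         if s[i] != s[i+2]:
--             return False
--     return True
-- ===== SOURCE B (Python) =====
-- def solve(s):
--     if len(s) % 2 == 0:
--         return False
--     if s[0] == s[1]:
--         return False
--     return s[0::2] == s[0] * ((len(s) + 1) // 2)
-- ===== Notes on version B (the rewrite author's own statement) =====
-- stated objective: simpler
-- what changed: Instead of scanning consecutive even positions pairwise with an early-exit loop, B constructs the expected canonical string s[0] repeated (len(s)+1)//2 times and compares it with the even-index slice in one equality test.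
import Mathlib
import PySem

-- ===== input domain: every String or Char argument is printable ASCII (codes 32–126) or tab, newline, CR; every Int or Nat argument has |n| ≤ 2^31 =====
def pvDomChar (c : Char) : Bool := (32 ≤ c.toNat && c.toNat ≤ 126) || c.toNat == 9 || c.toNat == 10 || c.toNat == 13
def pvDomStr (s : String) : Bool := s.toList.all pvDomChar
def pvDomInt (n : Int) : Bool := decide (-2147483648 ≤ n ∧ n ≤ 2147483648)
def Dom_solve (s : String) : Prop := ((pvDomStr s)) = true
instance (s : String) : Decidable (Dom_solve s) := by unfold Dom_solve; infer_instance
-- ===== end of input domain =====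

-- B replaces A's early-exit scan over consecutive even positions by constructing the
-- expected canonical string s[0]*((len(s)+1)//2) and comparing it with s[0::2] (simpler, same cost).

-- ===== PORT A =====
def solve (s : String) : Bool :=
  let cs := s.toList
  if cs.length % 2 == 0 then false
  else if PySem.List.pyGet? cs 0 == PySem.List.pyGet? cs 1 then false
  else (PySem.List.pyRange 0 ((cs.length : Int) - 2) 2).all
    (fun i => PySem.List.pyGet? cs i == PySem.List.pyGet? cs (i + 2))

-- ===== PORT B =====
def solve_alt (s : String) : Bool :=
  let cs := s.toList
  if cs.length % 2 == 0 then false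
  else if PySem.List.pyGet? cs 0 == PySem.List.pyGet? cs 1 then false
  else
    match PySem.List.slice? cs none none 2, PySem.List.pyGet? cs 0 with
    | some evens, some c0 => evens == List.replicate ((cs.length + 1) / 2) c0
    | _, _ => false

-- ===== PRECONDITION & SPEC =====
-- Pre_ excludes exactly the strings of length 1, on which A (and B) raise IndexError at s[1].
def Pre_solve (s : String) : Prop := s.toList.length ≠ 1
instance (s : String) : Decidable (Pre_solve s) := by unfold Pre_solve; infer_instance
def pvWitness_solve : String := "aba"

def Spec_solve (s : String) (out : Bool) : Prop := out = solve_alt s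
instance (s : String) (out : Bool) : Decidable (Spec_solve s out) := by unfold Spec_solve; infer_instance

-- ===== CLAIM (what is proved, stated in full; the proofs are below) =====
def Claim_equal_solve : Prop := ∀ (s : String), Dom_solve s → Pre_solve s → Spec_solve s (solve s)

-- ===== LEMMAS AND PROOFS =====

-- every second element of a list (= xs[::2])
def eo {α : Type} : List α → List α
  | [] => []
  | [x] => [x]
  | x :: _ :: t => x :: eo t

theorem eo_length {α : Type} (xs : List α) : (eo xs).length = (xs.length + 1) / 2 := by
  match xs with
  | [] => simp [eo]
  | [x] => simp [eo]
  | x :: y :: t => simp [eo, eo_length t]; omega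

theorem eo_getElem? {α : Type} (xs : List α) (k : Nat) : (eo xs)[k]? = xs[2 * k]? := by
  match xs, k with
  | [], k => simp [eo]
  | [x], 0 => rfl
  | [x], (k + 1) => simp [eo]
  | x :: y :: t, 0 => rfl
  | x :: y :: t, (k + 1) =>
      simp only [eo, List.getElem?_cons_succ]
      rw [eo_getElem? t k]
      have : 2 * (k + 1) = 2 * k + 1 + 1 := by omega
      rw [this]; simp

theorem fm_range {α : Type} (e : List α) :
    (List.range e.length).filterMap (fun k => e[k]?) = e := by
  induction e using List.reverseRecOn with
  | nil => simp
  | append_singleton t x ih =>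
      simp only [List.length_append, List.length_singleton, List.range_succ, List.filterMap_append]
      rw [List.filterMap_congr (g := fun k => t[k]?) ?_, ih] <;> simp
      intro a ha; rw [List.getElem?_append_left ha]

theorem slice_two {α : Type} (xs : List α) :
    PySem.List.slice? xs none none 2 = some (eo xs) := by
  simp only [PySem.List.slice?, PySem.List.sliceIndices]
  norm_num
  have hcount : (if 0 < xs.length then (((xs.length : Int) + 2 - 1) / 2).toNat else 0)
      = (eo xs).length := by
    rw [eo_length]; split <;> omega
  rw [hcount]
  rw [List.filterMap_congr (g := fun k => (eo xs)[k]?) ?_]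
  · exact fm_range (eo xs)
  · intro k _
    show xs[(2 * (k : Int)).toNat]? = (eo xs)[k]?
    have h2k : (2 * (k : Int)).toNat = 2 * k := by omega
    rw [h2k, eo_getElem? xs k]

theorem chain_iff (c : Char) (t : List Char) :
    (∀ k < t.length, (c :: t)[k]? = (c :: t)[k + 1]?) ↔ (∀ y ∈ c :: t, y = c) := by
  constructor
  · intro h
    have hall : ∀ k, k ≤ t.length → (c :: t)[k]? = some c := by
      intro k
      induction k with
      | zero => intro _; rfl
      | succ k ih => intro hk; rw [← h k (by omega)]; exact ih (by omega)
    intro y hy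
    obtain ⟨k, hget⟩ := List.mem_iff_getElem?.mp hy
    have hk : k ≤ t.length := by
      by_contra hk
      rw [List.getElem?_eq_none (by simpa using by omega)] at hget
      simp at hget
    rw [hall k hk] at hget
    exact (Option.some.inj hget).symm
  · intro h k hk
    have h1 : (c :: t)[k]'(by simp; omega) = c := h _ (List.getElem_mem _)
    have h2 : (c :: t)[k + 1]'(by simp; omega) = c := h _ (List.getElem_mem _)
    rw [List.getElem?_eq_getElem (by simp; omega), List.getElem?_eq_getElem (by simp; omega),
      h1, h2]

theorem loopA_iff (cs : List Char) (h3 : 3 ≤ cs.length) :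
    ((PySem.List.pyRange 0 ((cs.length : Int) - 2) 2).all
        (fun i => PySem.List.pyGet? cs i == PySem.List.pyGet? cs (i + 2)) = true)
      ↔ (∀ k < (eo cs).length - 1, (eo cs)[k]? = (eo cs)[k + 1]?) := by
  rw [PySem.List.pyRange_of_pos 0 ((cs.length : Int) - 2) (by norm_num)]
  have hcnt : (if (0 : Int) < (cs.length : Int) - 2
        then (((cs.length : Int) - 2 - 0 + 2 - 1) / 2).toNat else 0) = (eo cs).length - 1 := by
    rw [eo_length]; split <;> omega
  rw [hcnt]
  simp only [List.all_map, List.all_eq_true, List.mem_range, Function.comp]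
  refine forall_congr' (fun k => imp_congr_right (fun _ => ?_))
  have g1 : PySem.List.pyGet? cs (0 + 2 * (k : Int)) = (eo cs)[k]? := by
    have : (0 + 2 * (k : Int)) = ((2 * k : Nat) : Int) := by push_cast; ring
    rw [this, PySem.List.pyGet?_natCast, eo_getElem?]
  have g2 : PySem.List.pyGet? cs (0 + 2 * (k : Int) + 2) = (eo cs)[k + 1]? := by
    have : (0 + 2 * (k : Int) + 2) = ((2 * (k + 1) : Nat) : Int) := by push_cast; ring
    rw [this, PySem.List.pyGet?_natCast, eo_getElem?]
  rw [g1, g2, beq_iff_eq]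

-- ===== VERDICT (by name: the statement is the Claim_ definition above) =====
theorem solve_spec : Claim_equal_solve := by
  intro s _ hpre
  unfold Spec_solve solve solve_alt
  simp only []
  by_cases heven : s.toList.length % 2 == 0
  · rw [if_pos heven, if_pos heven]
  · rw [if_neg heven, if_neg heven]
    have h3 : 3 ≤ s.toList.length := by
      unfold Pre_solve at hpre
      simp only [beq_iff_eq] at heven
      omega
    match hcs : s.toList with
    | [] => rw [hcs] at h3; simp at h3
    | [c] => rw [hcs] at h3; simp at h3
    | c0 :: c1 :: rest =>
      rw [hcs] at h3 heven
      by_cases hcc : PySem.List.pyGet? (c0 :: c1 :: rest) 0 == PySem.List.pyGet? (c0 :: c1 :: rest) 1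
      · rw [if_pos hcc, if_pos hcc]
      · rw [if_neg hcc, if_neg hcc]
        rw [slice_two]
        have hget0 : PySem.List.pyGet? (c0 :: c1 :: rest) 0 = some c0 := by
          simp only [PySem.List.pyGet?, PySem.List.pyIdx?]
          rw [if_pos (le_refl (0:Int)), if_pos (by omega : (0:Int) < ((c0 :: c1 :: rest).length : Int))]
          rfl
        rw [hget0]
        rw [Bool.eq_iff_iff]
        have heo : eo (c0 :: c1 :: rest) = c0 :: eo rest := rfl
        rw [loopA_iff _ h3, heo]
        have hlen : (eo (c0 :: c1 :: rest)).length = ((c0 :: c1 :: rest).length + 1) / 2 :=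
          eo_length _
        rw [heo] at hlen
        constructor
        · intro h
          have hall := (chain_iff c0 (eo rest)).mp (by intro k hk; exact h k (by simp; omega))
          simp only [beq_iff_eq]
          rw [← hlen]
          exact List.eq_replicate_of_mem hall
        · intro h k hk
          simp only [beq_iff_eq, ← hlen] at h
          have hall : ∀ y ∈ c0 :: eo rest, y = c0 := by
            intro y hy; rw [h] at hy; exact List.eq_of_mem_replicate hy
          exact (chain_iff c0 (eo rest)).mpr hall k (by simp at hk; omega)
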